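-- pv_equiv track=rewrite | github.com/unicamp-dl/Lissard | src/repeat_copy_logic/ukrainian.py | x_administrative_district
-- ===== SOURCE A (Python) =====
-- def x_administrative_district(times):
--     '''
--     repeat the phrase the administrative district three times, and say the phrase hello world after the second time
--     '''
--     out = ''
--     count = 0
--     for x in range(0, times+1):
--         if count == 2:
--             out+='привіт світ '
--         else:
--             out+='адміністративний район '
--         count+=1
--     return out.strip()
-- ===== SOURCE B (Python) =====
-- def x_administrative_district(times):
--     parts = ['адміністративний район'] * (times + 1)
--     if times + 1 > 2:
--         parts[2] = 'привіт світ'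
--     return ' '.join(parts)
-- ===== Notes on version B (the rewrite author's own statement) =====
-- stated objective: simpler
-- what changed: B drops A's per-iteration count branch, repeated string concatenation and final strip: it builds a uniform list of the default phrase, overwrites the third slot once when it exists, and joins with single spaces.
import Mathlib
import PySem

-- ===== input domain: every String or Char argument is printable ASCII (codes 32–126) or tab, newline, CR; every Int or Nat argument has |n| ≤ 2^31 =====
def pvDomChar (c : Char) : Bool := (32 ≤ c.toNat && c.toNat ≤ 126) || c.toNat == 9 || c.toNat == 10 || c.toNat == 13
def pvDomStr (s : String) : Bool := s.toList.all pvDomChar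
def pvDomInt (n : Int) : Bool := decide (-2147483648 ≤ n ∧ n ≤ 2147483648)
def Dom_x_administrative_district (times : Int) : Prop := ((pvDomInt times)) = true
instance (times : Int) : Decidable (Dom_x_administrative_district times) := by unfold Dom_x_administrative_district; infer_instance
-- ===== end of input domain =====

-- B builds the phrase list uniformly and patches index 2 once instead of branching on a count
-- inside the loop; objective: simpler. Same return value everywhere.

-- ===== PORT A =====
-- the two phrases A appends, each with its trailing space, as in the Python source
def pvHelloSp : List Char := "привіт світ ".toList
def pvDistSp : List Char := "адміністративний район ".toList

def x_administrative_district (times : Int) : String :=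
  let st := (PySem.List.pyRange 0 (times + 1) 1).foldl
    (fun (s : List Char × Int) _x =>
      if s.2 = 2 then (s.1 ++ pvHelloSp, s.2 + 1) else (s.1 ++ pvDistSp, s.2 + 1))
    ([], 0)
  String.ofList (PySem.Chars.strip st.1)

-- ===== PORT B =====
def pvHello : List Char := "привіт світ".toList
def pvDist : List Char := "адміністративний район".toList

def x_administrative_district_alt (times : Int) : String :=
  let parts := PySem.List.pyRepeat [pvDist] (times + 1)
  let parts := if times + 1 > 2 then parts.set 2 pvHello else parts
  String.ofList (PySem.Chars.join [' '] parts)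

-- ===== PRECONDITION & SPEC =====
def Spec_x_administrative_district (times : Int) (out : String) : Prop := out = x_administrative_district_alt times
instance (times : Int) (out : String) : Decidable (Spec_x_administrative_district times out) := by unfold Spec_x_administrative_district; infer_instance

-- ===== CLAIM (what is proved, stated in full; the proofs are below) =====
def Claim_equal_x_administrative_district : Prop := ∀ (times : Int), Dom_x_administrative_district times → Spec_x_administrative_district times (x_administrative_district times)

-- ===== LEMMAS AND PROOFS =====

-- what A's loop produces after k more iterations starting at count c
def pvTailOut (c : Int) : Nat → List Char
  | 0 => []
  | k + 1 => (if c = 2 then pvHelloSp else pvDistSp) ++ pvTailOut (c + 1) k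

lemma pv_fold_eq (l : List Int) (cs : List Char) (c : Int) :
    l.foldl
      (fun (s : List Char × Int) _x =>
        if s.2 = 2 then (s.1 ++ pvHelloSp, s.2 + 1) else (s.1 ++ pvDistSp, s.2 + 1))
      (cs, c)
    = (cs ++ pvTailOut c l.length, c + l.length) := by
  induction l generalizing cs c with
  | nil => simp [pvTailOut]
  | cons x t ih =>
    simp only [List.foldl_cons, List.length_cons]
    by_cases h : c = 2 <;>
      simp [h, ih, pvTailOut, List.append_assoc] <;> ring

-- past count 2 the loop only appends the default phrase
lemma pv_tail_const (k : Nat) (c : Int) (hc : 3 ≤ c) :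
    pvTailOut c k = (List.replicate k pvDistSp).flatten := by
  induction k generalizing c with
  | zero => simp [pvTailOut]
  | succ k ih =>
    have h2 : ¬ (c = 2) := by omega
    simp [pvTailOut, h2, ih (c + 1) (by omega), List.replicate_succ]

lemma pv_rot (k : Nat) (d : List Char) :
    [' '] ++ (List.replicate k (d ++ [' '])).flatten
      = (List.replicate k ([' '] ++ d)).flatten ++ [' '] := by
  induction k with
  | zero => simp
  | succ k ih => simp [List.replicate_succ, List.append_assoc, ih]

lemma pv_strip_append_space (xs : List Char) (h1 : PySem.Chars.lstrip xs = xs) :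
    PySem.Chars.strip (xs ++ [' ']) = PySem.Chars.rstrip xs := by
  rcases xs with _ | ⟨a, t⟩
  · decide
  · have ha : PySem.Chars.isspace a = false := by
      by_contra hcon
      have : PySem.Chars.isspace a = true := by
        cases h : PySem.Chars.isspace a
        · exact absurd h hcon
        · rfl
      simp [PySem.Chars.lstrip, this] at h1
      have hlen := congrArg List.length h1
      have hle := List.length_dropWhile_le (p := PySem.Chars.isspace) (l := t)
      simp at hlen
      omega
    have hsp : PySem.Chars.isspace ' ' = true := by decide
    simp [PySem.Chars.strip, PySem.Chars.lstrip, PySem.Chars.rstrip,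
      ha, hsp, List.reverse_append]

lemma pv_rstrip_append_last (ys : List Char) (b : Char)
    (hb : PySem.Chars.isspace b = false) :
    PySem.Chars.rstrip (ys ++ [b]) = ys ++ [b] := by
  simp [PySem.Chars.rstrip, List.reverse_append, hb]

lemma pv_lstrip_cons (a : Char) (t : List Char) (ha : PySem.Chars.isspace a = false) :
    PySem.Chars.lstrip (a :: t) = a :: t := by
  simp [PySem.Chars.lstrip, ha]

lemma pv_join_cons_replicate (k : Nat) (p : List Char) :
    PySem.Chars.join [' '] (p :: List.replicate k pvDist)
      = p ++ (List.replicate k ([' '] ++ pvDist)).flatten := by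
  induction k generalizing p with
  | zero => simp [PySem.Chars.join_singleton]
  | succ k ih =>
    simp [List.replicate_succ, PySem.Chars.join_cons_cons, ih, List.append_assoc]

def pvParts (m : Nat) : List (List Char) :=
  if 2 < m then (List.replicate m pvDist).set 2 pvHello else List.replicate m pvDist

lemma pv_key (m : Nat) :
    PySem.Chars.strip (pvTailOut 0 m) = PySem.Chars.join [' '] (pvParts m) := by
  match m with
  | 0 => decide
  | 1 => decide
  | 2 => decide
  | (k + 3) =>
    have hparts : pvParts (k + 3) = pvDist :: pvDist :: pvHello :: List.replicate k pvDist := by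
      simp [pvParts, List.replicate_succ]
    rw [hparts]
    have hL : pvTailOut 0 (k + 3)
        = pvDistSp ++ pvDistSp ++ pvHelloSp ++ (List.replicate k pvDistSp).flatten := by
      simp [pvTailOut, pv_tail_const k 3 (by omega), List.append_assoc]
    rw [hL]
    have hdist : pvDistSp = pvDist ++ [' '] := by decide
    have hhello : pvHelloSp = pvHello ++ [' '] := by decide
    rw [PySem.Chars.join_cons_cons, PySem.Chars.join_cons_cons, pv_join_cons_replicate]
    rw [hdist, hhello]
    have hrot := pv_rot k pvDist
    have hassoc :
        (pvDist ++ [' ']) ++ (pvDist ++ [' ']) ++ (pvHello ++ [' ']) ++ (List.replicate k (pvDist ++ [' '])).flatten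
          = (pvDist ++ [' '] ++ pvDist ++ [' '] ++ pvHello ++ ((List.replicate k ([' '] ++ pvDist)).flatten)) ++ [' '] := by
      calc (pvDist ++ [' ']) ++ (pvDist ++ [' ']) ++ (pvHello ++ [' ']) ++ (List.replicate k (pvDist ++ [' '])).flatten
          = pvDist ++ [' '] ++ pvDist ++ [' '] ++ pvHello ++ ([' '] ++ (List.replicate k (pvDist ++ [' '])).flatten) := by
            simp [List.append_assoc]
        _ = pvDist ++ [' '] ++ pvDist ++ [' '] ++ pvHello ++ ((List.replicate k ([' '] ++ pvDist)).flatten ++ [' ']) := by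
            rw [hrot]
        _ = (pvDist ++ [' '] ++ pvDist ++ [' '] ++ pvHello ++ ((List.replicate k ([' '] ++ pvDist)).flatten)) ++ [' '] := by
            simp [List.append_assoc]
    rw [hassoc, pv_strip_append_space]
    · -- rstrip of a list ending in a non-space character
      rcases k with _ | j
      · decide
      · have hrep : (List.replicate (j + 1) ([' '] ++ pvDist)).flatten
            = (List.replicate j ([' '] ++ pvDist)).flatten ++ ([' '] ++ pvDist) := by
          rw [List.replicate_succ']; simp
        have hd : pvDist = "адміністративний райо".toList ++ ['н'] := by decide
        rw [hrep]
        have : pvDist ++ [' '] ++ pvDist ++ [' '] ++ pvHello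
              ++ ((List.replicate j ([' '] ++ pvDist)).flatten ++ ([' '] ++ pvDist))
            = (pvDist ++ [' '] ++ pvDist ++ [' '] ++ pvHello
              ++ (List.replicate j ([' '] ++ pvDist)).flatten ++ [' '] ++ "адміністративний райо".toList) ++ ['н'] := by
          rw [hd]; simp [List.append_assoc]
        rw [this, pv_rstrip_append_last _ _ (by decide), ← this]
        simp [List.append_assoc]
    · -- lstrip fixed: the string starts with a non-space Cyrillic letter
      have hd : pvDist = 'а' :: "дміністративний район".toList := by decide
      rw [hd]
      simp only [List.cons_append]
      exact pv_lstrip_cons _ _ (by decide)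

-- ===== VERDICT (by name: the statement is the Claim_ definition above) =====
theorem x_administrative_district_spec : Claim_equal_x_administrative_district := by
  intro times _
  unfold Spec_x_administrative_district x_administrative_district x_administrative_district_alt
  simp only [pv_fold_eq, PySem.List.length_pyRange_one, List.nil_append,
    PySem.List.pyRepeat_singleton]
  rw [pv_key]
  congr 1
  unfold pvParts
  by_cases h : times + 1 > 2
  · have h2 : 2 < (times + 1 - 0).toNat := by omega
    have h3 : (times + 1).toNat = (times + 1 - 0).toNat := by omega
    simp [h, h2, h3]
  · have h2 : ¬ (2 < (times + 1 - 0).toNat) := by omega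
    have h3 : (times + 1).toNat = (times + 1 - 0).toNat := by omega
    simp [h, h2, h3]
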